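-- pv_equiv track=rewrite | github.com/aitoruriapersonal/documentacionGenerica | genera_torneo.py | compute_arena_score
-- ===== SOURCE A (Python) =====
-- def compute_arena_score(game_results, berserk_wins=0):
--     """
--     Compute Lichess Arena score.
--     game_results: list of 'win'/'draw'/'loss' in chronological order.
--     Returns total score.
--
--     Rules:
--     - Normal: win=2, draw=1, loss=0
--     - Streak active (from 3rd+ consecutive win): win=4, draw=2
--     - Streak activates AFTER 2 consecutive wins (2nd win itself scores normally)
--     - A loss breaks the streak AND resets the win counter
--     - A draw breaks the activation counter (resets to 0) but does NOT break active streak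
--     - Draws give +2 if streak is active, +1 otherwise
--     """
--     score = 0
--     streak_active = False
--     consecutive_wins = 0
--     for r in game_results:
--         if r == 'win':
--             score += 4 if streak_active else 2
--             consecutive_wins += 1
--             if consecutive_wins >= 2:
--                 streak_active = True
--         elif r == 'draw':
--             score += 2 if streak_active else 1
--             consecutive_wins = 0  # draws reset activation counter
--         else:  # loss
--             streak_active = False
--             consecutive_wins = 0
--     score += berserk_wins
--     return score
-- ===== SOURCE B (Python) =====
-- def compute_arena_score(game_results, berserk_wins=0):
--     """Segment-based rewrite: split on losses, score each segment from its
--     activation index (first adjacent double win)."""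
--     total = berserk_wins
--     seg = []
--     for r in game_results:
--         if r == 'win' or r == 'draw':
--             seg.append(r)
--         else:
--             total += _segment_score(seg)
--             seg = []
--     return total + _segment_score(seg)
--
--
-- def _segment_score(seg):
--     # activation index: first i >= 1 with seg[i-1] == seg[i] == 'win';
--     # len(seg) (past the end) when the streak never activates in this segment
--     act = len(seg)
--     for i, (a, b) in enumerate(zip(seg, seg[1:])):
--         if a == 'win' and b == 'win':
--             act = i + 1
--             break
--     s = 0
--     for j, r in enumerate(seg):
--         base = 2 if r == 'win' else 1
--         s += 2 * base if j > act else base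
--     return s
-- ===== Notes on version B (the rewrite author's own statement) =====
-- stated objective: alternative
-- what changed: Replaces A's single pass with two mutable flags (streak_active, consecutive_wins) by a segment decomposition: split results on losses, find each segment's activation index (first adjacent pair of wins) and score positions after it at double rate.
import Mathlib
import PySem

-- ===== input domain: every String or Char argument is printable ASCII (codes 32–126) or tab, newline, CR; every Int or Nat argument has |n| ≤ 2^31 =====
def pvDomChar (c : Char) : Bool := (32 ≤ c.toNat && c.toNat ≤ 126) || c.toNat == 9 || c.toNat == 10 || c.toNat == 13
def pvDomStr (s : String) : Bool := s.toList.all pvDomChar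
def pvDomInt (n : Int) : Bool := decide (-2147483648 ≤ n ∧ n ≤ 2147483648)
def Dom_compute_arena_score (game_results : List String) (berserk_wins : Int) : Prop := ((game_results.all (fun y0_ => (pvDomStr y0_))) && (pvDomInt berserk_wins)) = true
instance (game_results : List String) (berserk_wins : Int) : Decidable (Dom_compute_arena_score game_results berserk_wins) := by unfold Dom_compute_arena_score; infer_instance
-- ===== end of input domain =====

-- B rewrites A's two-flag state machine as a segment decomposition (split on losses,
-- score each segment from its first adjacent double win); objective: alternative.

-- ===== PORT A =====
def compute_arena_score (game_results : List String) (berserk_wins : Int) : Int :=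
  let st := game_results.foldl (fun (st : Int × Bool × Int) r =>
    let score := st.1
    let streak_active := st.2.1
    let consecutive_wins := st.2.2
    if r = "win" then
      let score := score + (if streak_active then (4:Int) else 2)
      let consecutive_wins := consecutive_wins + 1
      let streak_active := if consecutive_wins ≥ 2 then true else streak_active
      (score, streak_active, consecutive_wins)
    else if r = "draw" then
      (score + (if streak_active then (2:Int) else 1), streak_active, (0:Int))
    else
      (score, false, (0:Int)))
    ((0:Int), false, (0:Int))
  st.1 + berserk_wins

-- ===== PORT B =====
-- activation index: first i >= 1 with seg[i-1] == seg[i] == 'win'; len(seg) when none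
def actIdx : List String → Int
  | a :: b :: rest => if a = "win" ∧ b = "win" then 1 else 1 + actIdx (b :: rest)
  | [_] => 1
  | [] => 0

def segScore (seg : List String) : Int :=
  let act := actIdx seg
  (PySem.List.enumerate seg 0).foldl (fun s jr =>
    let base : Int := if jr.2 = "win" then 2 else 1
    s + (if jr.1 > act then 2 * base else base)) 0

def compute_arena_score_alt (game_results : List String) (berserk_wins : Int) : Int :=
  let st := game_results.foldl (fun (st : Int × List String) r =>
    if r = "win" ∨ r = "draw" then (st.1, st.2 ++ [r])
    else (st.1 + segScore st.2, ([] : List String)))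
    (berserk_wins, ([] : List String))
  st.1 + segScore st.2

-- ===== PRECONDITION & SPEC =====
def Spec_compute_arena_score (game_results : List String) (berserk_wins : Int) (out : Int) : Prop := out = compute_arena_score_alt game_results berserk_wins
instance (game_results : List String) (berserk_wins : Int) (out : Int) : Decidable (Spec_compute_arena_score game_results berserk_wins out) := by unfold Spec_compute_arena_score; infer_instance

-- ===== CLAIM (what is proved, stated in full; the proofs are below) =====
def Claim_equal_compute_arena_score : Prop := ∀ (game_results : List String) (berserk_wins : Int), Dom_compute_arena_score game_results berserk_wins → Spec_compute_arena_score game_results berserk_wins (compute_arena_score game_results berserk_wins)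

-- ===== LEMMAS AND PROOFS =====

-- trailing consecutive wins of a segment (mirrors A's counter)
def trail (seg : List String) : Int := seg.foldl (fun c r => if r = "win" then c + 1 else 0) 0

theorem trail_aux_nonneg (l : List String) (c : Int) (h : 0 ≤ c) :
    0 ≤ l.foldl (fun c r => if r = "win" then c + 1 else 0) c := by
  induction l generalizing c with
  | nil => exact h
  | cons a t ih => simp only [List.foldl_cons]; split <;> [exact ih _ (by omega); exact ih _ le_rfl]

theorem trail_nonneg (seg : List String) : 0 ≤ trail seg := trail_aux_nonneg seg 0 le_rfl

theorem trail_append (seg : List String) (x : String) :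
    trail (seg ++ [x]) = if x = "win" then trail seg + 1 else 0 := by
  simp [trail, List.foldl_append]

theorem trail_pos_iff (seg : List String) : 0 < trail seg ↔ seg.getLast? = some "win" := by
  induction seg using List.reverseRecOn with
  | nil => simp [trail]
  | append_singleton seg x ih =>
    rw [trail_append]
    by_cases hx : x = "win" <;> simp [hx]
    · have := trail_nonneg seg; omega
  -- getLast? (seg ++ [x]) = some x handled by simp

theorem actIdx_le (seg : List String) : actIdx seg ≤ seg.length := by
  induction seg with
  | nil => simp [actIdx]
  | cons a t ih =>
    cases t with
    | nil => simp [actIdx]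
    | cons b r =>
      simp only [actIdx, List.length_cons] at *
      split <;> push_cast <;> omega

theorem actIdx_append_win (seg : List String) :
    actIdx (seg ++ ["win"]) =
      if actIdx seg < seg.length then actIdx seg
      else if seg.getLast? = some "win" then (seg.length : Int) else (seg.length : Int) + 1 := by
  induction seg with
  | nil => simp [actIdx]
  | cons a t ih =>
    cases t with
    | nil =>
      by_cases ha : a = "win" <;> simp [actIdx, ha]
    | cons b r =>
      have hle := actIdx_le (b :: r)
      by_cases hab : a = "win" ∧ b = "win"
      · obtain ⟨ha, hb⟩ := hab
        have h1 : actIdx (a :: b :: r) = 1 := by simp [actIdx, ha, hb]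
        have h2 : actIdx ((a :: b :: r) ++ ["win"]) = 1 := by
          simp [actIdx, ha, hb]
        rw [h2, h1, if_pos (by simp only [List.length_cons]; omega)]
      · simp only [List.cons_append, actIdx, hab, if_neg, not_false_iff, List.length_cons] at *
        rw [ih]
        have hlast : (a :: b :: r).getLast? = (b :: r).getLast? := by
          simp [List.getLast?_cons_cons]
        simp only [List.getLast?_cons_cons] at *
        push_cast
        split_ifs <;> push_cast <;> omega

theorem actIdx_append_other (seg : List String) (x : String) (hx : x ≠ "win") :
    actIdx (seg ++ [x]) =
      if actIdx seg < seg.length then actIdx seg else (seg.length : Int) + 1 := by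
  induction seg with
  | nil => simp [actIdx]
  | cons a t ih =>
    cases t with
    | nil => simp [actIdx, hx]
    | cons b r =>
      have hle := actIdx_le (b :: r)
      by_cases hab : a = "win" ∧ b = "win"
      · obtain ⟨ha, hb⟩ := hab
        have h1 : actIdx (a :: b :: r) = 1 := by simp [actIdx, ha, hb]
        have h2 : actIdx ((a :: b :: r) ++ [x]) = 1 := by
          simp [actIdx, ha, hb]
        rw [h2, h1, if_pos (by simp only [List.length_cons]; omega)]
      · simp only [List.cons_append, actIdx, hab, if_neg, not_false_iff, List.length_cons] at *
        rw [ih]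
        push_cast
        split_ifs <;> push_cast <;> omega

-- segment score as a sum, to reason about appends
theorem segScore_act_irrel (seg : List String) (act act' : Int)
    (h : act = act' ∨ ((seg.length : Int) ≤ act ∧ (seg.length : Int) ≤ act')) :
    (PySem.List.enumerate seg 0).foldl (fun s jr =>
      let base : Int := if jr.2 = "win" then 2 else 1
      s + (if jr.1 > act then 2 * base else base)) 0
    = (PySem.List.enumerate seg 0).foldl (fun s jr =>
      let base : Int := if jr.2 = "win" then 2 else 1
      s + (if jr.1 > act' then 2 * base else base)) 0 := by
  rcases h with h | ⟨h1, h2⟩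
  · rw [h]
  · apply PySem.List.foldl_congr_mem
    intro acc jr hmem
    rw [PySem.List.mem_enumerate_iff] at hmem
    obtain ⟨k, hk, rfl⟩ := hmem
    have hj : ¬ ((0:Int) + (k:Int) > act) := by omega
    have hj' : ¬ ((0:Int) + (k:Int) > act') := by omega
    simp only []
    rw [if_neg hj, if_neg hj']

theorem segScore_append (seg : List String) (x : String) :
    segScore (seg ++ [x]) = segScore seg +
      (let base : Int := if x = "win" then 2 else 1
       if (seg.length : Int) > actIdx (seg ++ [x]) then 2 * base else base) := by
  have hact : actIdx (seg ++ [x]) = actIdx seg ∨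
      ((seg.length : Int) ≤ actIdx (seg ++ [x]) ∧ (seg.length : Int) ≤ actIdx seg) := by
    by_cases hx : x = "win"
    · subst hx; rw [actIdx_append_win]; split_ifs <;> [left; right; right] <;>
        first | rfl | (constructor <;> omega)
    · rw [actIdx_append_other seg x hx]; split_ifs with h
      · left; rfl
      · right; constructor <;> omega
  unfold segScore
  rw [PySem.List.enumerate_append, List.foldl_append]
  simp only [PySem.List.enumerate, List.foldl_cons, List.foldl_nil]
  rw [segScore_act_irrel seg (actIdx (seg ++ [x])) (actIdx seg) hact]
  simp

-- A's score component is additive in its initial value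
theorem stepA_shift (rest : List String) (s c : Int) (f : Bool) (w : Int) :
    rest.foldl (fun (st : Int × Bool × Int) r =>
      let score := st.1
      let streak_active := st.2.1
      let consecutive_wins := st.2.2
      if r = "win" then
        let score := score + (if streak_active then (4:Int) else 2)
        let consecutive_wins := consecutive_wins + 1
        let streak_active := if consecutive_wins ≥ 2 then true else streak_active
        (score, streak_active, consecutive_wins)
      else if r = "draw" then
        (score + (if streak_active then (2:Int) else 1), streak_active, (0:Int))
      else
        (score, false, (0:Int))) (s + c, f, w)
    = (let st := rest.foldl (fun (st : Int × Bool × Int) r =>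
      let score := st.1
      let streak_active := st.2.1
      let consecutive_wins := st.2.2
      if r = "win" then
        let score := score + (if streak_active then (4:Int) else 2)
        let consecutive_wins := consecutive_wins + 1
        let streak_active := if consecutive_wins ≥ 2 then true else streak_active
        (score, streak_active, consecutive_wins)
      else if r = "draw" then
        (score + (if streak_active then (2:Int) else 1), streak_active, (0:Int))
      else
        (score, false, (0:Int))) (s, f, w)
      (st.1 + c, st.2.1, st.2.2)) := by
  induction rest generalizing s f w with
  | nil => simp
  | cons r rest ih =>
    simp only [List.foldl_cons]
    by_cases hw : r = "win"
    · simp only [hw, if_pos]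
      rw [show s + c + (if f then (4:Int) else 2) = (s + (if f then (4:Int) else 2)) + c by ring]
      exact ih _ _ _
    · by_cases hd : r = "draw"
      · simp only [hw, hd, if_neg, if_pos, not_false_iff]
        rw [show s + c + (if f then (2:Int) else 1) = (s + (if f then (2:Int) else 1)) + c by ring]
        exact ih _ _ _
      · simp only [hw, hd, if_neg, not_false_iff]
        exact ih _ _ _

theorem hscore_win (total : Int) (seg : List String) :
    total + segScore seg + (if decide (actIdx seg < (seg.length : Int)) then (4:Int) else 2)
      = total + segScore (seg ++ ["win"]) := by
  rw [segScore_append]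
  have hle := actIdx_le seg
  rw [actIdx_append_win]
  simp only []
  by_cases h : actIdx seg < (seg.length : Int) <;> simp [h] <;> (try split_ifs) <;>
    (first | ring1 | (exfalso; omega))

theorem hflag_win (seg : List String) :
    (if trail seg + 1 ≥ 2 then true else decide (actIdx seg < (seg.length : Int)))
      = decide (actIdx (seg ++ ["win"]) < ((seg ++ ["win"]).length : Int)) := by
  have hle := actIdx_le seg
  have hnn := trail_nonneg seg
  have hpos := trail_pos_iff seg
  rw [actIdx_append_win]
  simp only [List.length_append, List.length_cons, List.length_nil]
  by_cases h : actIdx seg < (seg.length : Int)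
  · rw [if_pos h]
    simp [h]
    try omega
  · rw [if_neg h]
    by_cases hl : seg.getLast? = some "win"
    · have : 0 < trail seg := hpos.2 hl
      rw [if_pos (by omega : trail seg + 1 ≥ 2), if_pos hl]
      simp
      try omega
    · have : ¬ 0 < trail seg := fun hc => hl (hpos.1 hc)
      rw [if_neg (by omega : ¬ trail seg + 1 ≥ 2), if_neg hl]
      simp [h]
      try omega

theorem hscore_draw (total : Int) (seg : List String) :
    total + segScore seg + (if decide (actIdx seg < (seg.length : Int)) then (2:Int) else 1)
      = total + segScore (seg ++ ["draw"]) := by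
  rw [segScore_append]
  have hle := actIdx_le seg
  rw [actIdx_append_other seg "draw" (by decide)]
  simp only []
  by_cases h : actIdx seg < (seg.length : Int) <;> simp [h] <;> (try split_ifs) <;>
    (first | ring1 | (exfalso; omega))

theorem hflag_draw (seg : List String) :
    decide (actIdx seg < (seg.length : Int))
      = decide (actIdx (seg ++ ["draw"]) < ((seg ++ ["draw"]).length : Int)) := by
  have hle := actIdx_le seg
  rw [actIdx_append_other seg "draw" (by decide)]
  simp only [List.length_append, List.length_cons, List.length_nil]
  by_cases h : actIdx seg < (seg.length : Int)
  · rw [if_pos h]; simp [h]; try omega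
  · rw [if_neg h]; simp [h]; try omega

-- main invariant: A's machine on (total + segScore seg, hasAct seg, trail seg)
-- tracks B's (total, seg) accumulation
theorem main_inv (rest : List String) (total : Int) (seg : List String) :
    (rest.foldl (fun (st : Int × Bool × Int) r =>
      let score := st.1
      let streak_active := st.2.1
      let consecutive_wins := st.2.2
      if r = "win" then
        let score := score + (if streak_active then (4:Int) else 2)
        let consecutive_wins := consecutive_wins + 1
        let streak_active := if consecutive_wins ≥ 2 then true else streak_active
        (score, streak_active, consecutive_wins)
      else if r = "draw" then
        (score + (if streak_active then (2:Int) else 1), streak_active, (0:Int))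
      else
        (score, false, (0:Int)))
      (total + segScore seg, decide (actIdx seg < (seg.length : Int)), trail seg)).1
    = (rest.foldl (fun (st : Int × List String) r =>
        if r = "win" ∨ r = "draw" then (st.1, st.2 ++ [r])
        else (st.1 + segScore st.2, ([] : List String))) (total, seg)).1
      + segScore (rest.foldl (fun (st : Int × List String) r =>
        if r = "win" ∨ r = "draw" then (st.1, st.2 ++ [r])
        else (st.1 + segScore st.2, ([] : List String))) (total, seg)).2 := by
  induction rest generalizing total seg with
  | nil => simp
  | cons r rest ih =>
    simp only [List.foldl_cons]
    by_cases hw : r = "win"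
    · simp only [hw, if_pos, true_or, if_pos]
      have htrail : trail seg + 1 = trail (seg ++ ["win"]) := by
        rw [trail_append]; simp
      rw [hscore_win total seg, hflag_win seg, htrail]
      exact ih _ _
    · by_cases hd : r = "draw"
      · have ihd := ih total (seg ++ ["draw"])
        have ht : trail (seg ++ ["draw"]) = 0 := by rw [trail_append]; simp
        rw [← hscore_draw total seg, ← hflag_draw seg, ht] at ihd
        simp only [hd]
        rw [if_neg (by decide : ¬("draw" : String) = "win")]
        exact ihd
      · have hor : ¬ (r = "win" ∨ r = "draw") := by tauto
        simp only [hw, hd, hor, if_neg, not_false_iff]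
        have h0 : (total + segScore seg, false, (0:Int))
            = (total + segScore seg + segScore ([] : List String),
               decide (actIdx ([] : List String) < (([] : List String).length : Int)),
               trail ([] : List String)) := by
          simp [segScore, actIdx, trail, PySem.List.enumerate]
        rw [h0]
        exact ih _ _

-- ===== VERDICT (by name: the statement is the Claim_ definition above) =====
theorem compute_arena_score_spec : Claim_equal_compute_arena_score := by
  intro game_results berserk_wins _
  show compute_arena_score game_results berserk_wins
      = compute_arena_score_alt game_results berserk_wins
  unfold compute_arena_score compute_arena_score_alt
  have hmain := main_inv game_results berserk_wins ([] : List String)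
  have hinit : (berserk_wins + segScore ([] : List String),
      decide (actIdx ([] : List String) < ((([] : List String)).length : Int)),
      trail ([] : List String)) = ((0 : Int) + berserk_wins, false, (0 : Int)) := by
    simp [segScore, actIdx, trail, PySem.List.enumerate]
  rw [hinit] at hmain
  rw [stepA_shift game_results 0 berserk_wins false 0] at hmain
  simpa using hmain
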